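-- pv_equiv track=rewrite | github.com/jason00-Han/CodingTestPractice | dfs1.py | solution
-- ===== SOURCE A (Python) =====
-- def solution(numbers, target):
--     leaves = [0]
--     count = 0
--
--     for num in numbers:
--         temp = []
--         for leaf in leaves:
--             temp.append(leaf + num)
--             temp.append(leaf - num)
--         leaves = temp
--
--         if target in leaves:
--             count += 1
--     return count
-- ===== SOURCE B (Python) =====
-- def solution(numbers, target):
--     # target is reachable at step k iff (prefix_k - target) is even and
--     # (prefix_k - target)//2 is a subset sum of the first k numbers.
--     subset_sums = {0}
--     prefix = 0
--     count = 0
--     for num in numbers: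
--         subset_sums |= {t + num for t in subset_sums}
--         prefix += num
--         d = prefix - target
--         if d % 2 == 0 and d // 2 in subset_sums:
--             count += 1
--     return count
-- ===== Notes on version B (the rewrite author's own statement) =====
-- stated objective: faster
-- what changed: B replaces A's exponential list of all 2^k signed leaf sums with a deduplicated set of subset sums plus a running prefix sum, testing reachability arithmetically as (prefix - target) even and (prefix - target)//2 in the set.
import Mathlib
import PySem

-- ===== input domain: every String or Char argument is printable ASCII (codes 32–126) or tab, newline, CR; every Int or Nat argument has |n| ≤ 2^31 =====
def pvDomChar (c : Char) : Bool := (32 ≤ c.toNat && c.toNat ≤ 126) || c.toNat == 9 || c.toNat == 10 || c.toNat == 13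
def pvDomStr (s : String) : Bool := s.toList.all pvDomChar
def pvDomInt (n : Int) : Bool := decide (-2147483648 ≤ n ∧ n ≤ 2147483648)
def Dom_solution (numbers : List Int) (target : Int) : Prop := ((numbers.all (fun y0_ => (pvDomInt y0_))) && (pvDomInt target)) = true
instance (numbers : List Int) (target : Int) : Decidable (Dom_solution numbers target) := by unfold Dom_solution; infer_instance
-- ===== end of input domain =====

-- B replaces A's exponential ± leaf list with a deduplicated subset-sum set plus a prefix sum
-- (target reachable at step k iff prefix_k - target is even and (prefix_k - target)//2 is a subset sum).

-- ===== PORT A =====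
-- inner loop 'for leaf in leaves: temp.append(leaf+num); temp.append(leaf-num)' (same order, one pass)
def buildTemp (num : Int) : List Int → List Int
  | [] => []
  | l :: ls => (l + num) :: (l - num) :: buildTemp num ls

def solution (numbers : List Int) (target : Int) : Int :=
  (numbers.foldl (fun (st : List Int × Int) num =>
      let temp := buildTemp num st.1
      (temp, if temp.contains target then st.2 + 1 else st.2))
    ([0], 0)).2

-- ===== PORT B =====
def solution_alt (numbers : List Int) (target : Int) : Int :=
  (numbers.foldl (fun (st : (PySem.Set Int × Int) × Int) num =>
      let ss := PySem.Set.union st.1.1 (st.1.1.map (fun t => t + num))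
      let pre := st.1.2 + num
      let d := pre - target
      ((ss, pre),
        if PySem.Int.mod d 2 == 0 && PySem.Set.contains ss (PySem.Int.floordiv d 2)
        then st.2 + 1 else st.2))
    (([0], 0), 0)).2

-- ===== PRECONDITION & SPEC =====
def Spec_solution (numbers : List Int) (target : Int) (out : Int) : Prop := out = solution_alt numbers target
instance (numbers : List Int) (target : Int) (out : Int) : Decidable (Spec_solution numbers target out) := by unfold Spec_solution; infer_instance

-- ===== CLAIM (what is proved, stated in full; the proofs are below) =====
def Claim_equal_solution : Prop := ∀ (numbers : List Int) (target : Int), Dom_solution numbers target → Spec_solution numbers target (solution numbers target)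

-- ===== LEMMAS AND PROOFS =====

-- membership in A's doubled leaf list
lemma mem_temp (leaves : List Int) (num x : Int) :
    x ∈ buildTemp num leaves ↔ ∃ l ∈ leaves, x = l + num ∨ x = l - num := by
  induction leaves with
  | nil => simp [buildTemp]
  | cons l ls ih =>
    simp [buildTemp, ih]
    constructor
    · rintro (h | h | ⟨a, ha, h⟩)
      · exact Or.inl (Or.inl h)
      · exact Or.inl (Or.inr h)
      · exact Or.inr ⟨a, ha, h⟩
    · rintro ((h | h) | ⟨a, ha, h⟩)
      · exact Or.inl h
      · exact Or.inr (Or.inl h)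
      · exact Or.inr (Or.inr ⟨a, ha, h⟩)

-- membership in B's updated subset-sum set
lemma mem_ss (ss : PySem.Set Int) (num t : Int) :
    t ∈ PySem.Set.union ss (ss.map (fun u => u + num)) ↔
      t ∈ ss ∨ ∃ u ∈ ss, t = u + num := by
  rw [PySem.Set.mem_union]
  simp [List.mem_map, eq_comm]

-- the step condition agrees: target in temp ↔ d even ∧ d//2 in ss'
lemma cond_eq (target num pre : Int) (leaves : List Int) (ss : PySem.Set Int)
    (hinv : ∀ x, x ∈ leaves ↔ ∃ t ∈ ss, x = pre - 2 * t) :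
    (buildTemp num leaves).contains target =
      (PySem.Int.mod (pre + num - target) 2 == 0 &&
        PySem.Set.contains (PySem.Set.union ss (ss.map (fun u => u + num)))
          (PySem.Int.floordiv (pre + num - target) 2)) := by
  set d := pre + num - target with hd
  have hmem : target ∈ buildTemp num leaves ↔
      (PySem.Int.mod d 2 = 0 ∧
        PySem.Int.floordiv d 2 ∈ PySem.Set.union ss (ss.map (fun u => u + num))) := by
    rw [mem_temp]
    constructor
    · rintro ⟨l, hl, hcase⟩
      obtain ⟨t, ht, rfl⟩ := (hinv l).1 hl
      rcases hcase with h | h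
      ·
        have hdv : d = 2 * t := by omega
        have hmod : PySem.Int.mod d 2 = 0 := by
          rw [PySem.Int.mod_eq_zero_iff_dvd]; exact ⟨t, hdv⟩
        have hfd : PySem.Int.floordiv d 2 = t := by
          rw [PySem.Int.floordiv_eq_ediv_of_pos (by norm_num)]
          omega
        refine ⟨hmod, ?_⟩
        rw [hfd, mem_ss]; exact Or.inl ht
      · have hdv : d = 2 * (t + num) := by omega
        have hmod : PySem.Int.mod d 2 = 0 := by
          rw [PySem.Int.mod_eq_zero_iff_dvd]; exact ⟨t + num, hdv⟩
        have hfd : PySem.Int.floordiv d 2 = t + num := by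
          rw [PySem.Int.floordiv_eq_ediv_of_pos (by norm_num)]
          omega
        refine ⟨hmod, ?_⟩
        rw [hfd, mem_ss]; exact Or.inr ⟨t, ht, rfl⟩
    · rintro ⟨hmod, hin⟩
      have hsum := PySem.Int.floordiv_mul_add_mod d 2
      rw [hmod] at hsum
      rw [mem_ss] at hin
      rcases hin with hin | ⟨u, hu, hequ⟩
      · refine ⟨pre - 2 * PySem.Int.floordiv d 2, (hinv _).2 ⟨_, hin, rfl⟩, Or.inl (by omega)⟩
      · refine ⟨pre - 2 * u, (hinv _).2 ⟨u, hu, rfl⟩, Or.inr (by omega)⟩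
  rw [Bool.eq_iff_iff]
  simp only [Bool.and_eq_true, beq_iff_eq, PySem.Set.contains, List.contains_iff_mem]
  exact hmem

-- loop invariant: counts agree when leaves = { pre - 2t : t ∈ ss }
lemma loop_eq (target : Int) (numbers : List Int) :
    ∀ (leaves : List Int) (ss : PySem.Set Int) (pre c : Int),
      (∀ x, x ∈ leaves ↔ ∃ t ∈ ss, x = pre - 2 * t) →
      (numbers.foldl (fun (st : List Int × Int) num =>
          let temp := buildTemp num st.1
          (temp, if temp.contains target then st.2 + 1 else st.2)) (leaves, c)).2 =
      (numbers.foldl (fun (st : (PySem.Set Int × Int) × Int) num =>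
          let ss' := PySem.Set.union st.1.1 (st.1.1.map (fun t => t + num))
          let pre' := st.1.2 + num
          let d := pre' - target
          ((ss', pre'),
            if PySem.Int.mod d 2 == 0 && PySem.Set.contains ss' (PySem.Int.floordiv d 2)
            then st.2 + 1 else st.2)) ((ss, pre), c)).2 := by
  induction numbers with
  | nil => intro leaves ss pre c hinv; rfl
  | cons num rest ih =>
    intro leaves ss pre c hinv
    simp only [List.foldl_cons]
    rw [cond_eq target num pre leaves ss hinv]
    apply ih
    intro x
    rw [mem_temp]
    constructor
    · rintro ⟨l, hl, hcase⟩
      obtain ⟨t, ht, rfl⟩ := (hinv l).1 hl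
      rcases hcase with h | h
      · exact ⟨t, (mem_ss ss num t).2 (Or.inl ht), by omega⟩
      · exact ⟨t + num, (mem_ss ss num (t + num)).2 (Or.inr ⟨t, ht, rfl⟩), by omega⟩
    · rintro ⟨t, ht, rfl⟩
      rw [mem_ss] at ht
      rcases ht with ht | ⟨u, hu, rfl⟩
      · exact ⟨pre - 2 * t, (hinv _).2 ⟨t, ht, rfl⟩, Or.inl (by ring)⟩
      · exact ⟨pre - 2 * u, (hinv _).2 ⟨u, hu, rfl⟩, Or.inr (by ring)⟩

-- ===== VERDICT (by name: the statement is the Claim_ definition above) =====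
theorem solution_spec : Claim_equal_solution := by
  intro numbers target _
  unfold Spec_solution solution solution_alt
  apply loop_eq
  intro x
  simp
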